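-- pv_equiv track=rewrite | github.com/mushrifshahreyar/AI-Assgn | puzzle_solving.py | hashValueFinder
-- ===== SOURCE A (Python) =====
-- def hashValueFinder(state):
--     val = 0
--     for i in range(len(state)):
--         if(state[i] == "W"):
--             val += (11 * (i+1))
--         elif(state[i] == "B"):
--             val += (13 * (i+1))
--         else:
--             val += (15 * (i+1))
--
--     return val
-- ===== SOURCE B (Python) =====
-- def hashValueFinder(state):
--     # Index-free: scanning from the end, the running weight total tw equals
--     # sum of weights of positions >= current; summing tw over all steps
--     # gives sum_i w_i * (i+1), i.e. A's weighted hash.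
--     val = 0
--     tw = 0
--     for ch in reversed(state):
--         tw += 11 if ch == "W" else 13 if ch == "B" else 15
--         val += tw
--     return val
-- ===== Notes on version B (the rewrite author's own statement) =====
-- stated objective: alternative
-- what changed: B drops the position index entirely: it scans the list back to front keeping a running total of plain weights and sums that running total, which equals the index-weighted sum by the suffix-sum identity.
import Mathlib
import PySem

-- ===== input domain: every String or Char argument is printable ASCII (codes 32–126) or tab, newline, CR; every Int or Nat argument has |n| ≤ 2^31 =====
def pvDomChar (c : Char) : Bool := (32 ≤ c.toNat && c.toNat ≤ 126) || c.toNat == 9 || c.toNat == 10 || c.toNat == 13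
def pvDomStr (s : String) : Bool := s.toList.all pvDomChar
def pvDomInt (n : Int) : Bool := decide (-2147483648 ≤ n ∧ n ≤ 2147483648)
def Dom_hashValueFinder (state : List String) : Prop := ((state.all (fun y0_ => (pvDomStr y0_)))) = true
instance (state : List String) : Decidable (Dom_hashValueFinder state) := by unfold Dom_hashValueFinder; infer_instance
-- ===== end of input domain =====

-- B replaces A's indexed weighted accumulation by an index-free reversed scan summing a
-- running weight total (suffix-sum identity); proved to return exactly A's value (alternative).

-- ===== PORT A =====
-- A's indexed loop: val += 11*(i+1) for "W", 13*(i+1) for "B", else 15*(i+1).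
def hashValueFinderGo (l : List String) (i : Nat) (val : Int) : Int :=
  match l with
  | [] => val
  | s :: rest =>
      hashValueFinderGo rest (i + 1)
        (val + (if s == "W" then 11 * ((i : Int) + 1)
                else if s == "B" then 13 * ((i : Int) + 1)
                else 15 * ((i : Int) + 1)))

def hashValueFinder (state : List String) : Int :=
  hashValueFinderGo state 0 0

-- ===== PORT B =====
-- Source B's loop body over reversed(state): tw += weight; val += tw.
def hashValueFinderAltStep (p : Int × Int) (s : String) : Int × Int :=
  let tw := p.2 + (if s == "W" then (11 : Int) else if s == "B" then 13 else 15)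
  (p.1 + tw, tw)

def hashValueFinder_alt (state : List String) : Int :=
  (state.reverse.foldl hashValueFinderAltStep (0, 0)).1

-- ===== PRECONDITION & SPEC =====
def Spec_hashValueFinder (state : List String) (out : Int) : Prop := out = hashValueFinder_alt state
instance (state : List String) (out : Int) : Decidable (Spec_hashValueFinder state out) := by unfold Spec_hashValueFinder; infer_instance

-- ===== CLAIM =====
def Claim_equal_hashValueFinder : Prop := ∀ (state : List String), Dom_hashValueFinder state → Spec_hashValueFinder state (hashValueFinder state)

-- ===== LEMMAS AND PROOFS =====

-- the plain weight of one entry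
def pvW (s : String) : Int := if s == "W" then 11 else if s == "B" then 13 else 15

-- total weight of a list
def pvT (l : List String) : Int :=
  match l with
  | [] => 0
  | s :: r => pvW s + pvT r

-- the index-weighted hash, defined structurally (0-based within l)
def pvH (l : List String) : Int :=
  match l with
  | [] => 0
  | s :: r => pvW s + pvH r + pvT r

theorem pvGo_eq (l : List String) :
    ∀ (k : Nat) (v : Int), hashValueFinderGo l k v = v + pvH l + (k : Int) * pvT l := by
  induction l with
  | nil => intro k v; simp [hashValueFinderGo, pvH, pvT]
  | cons s r ih =>
      intro k v
      simp only [hashValueFinderGo, pvH, pvT]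
      rw [ih]
      unfold pvW
      split_ifs <;> push_cast <;> ring

theorem pvFoldr_eq (l : List String) :
    l.foldr (fun s p => hashValueFinderAltStep p s) ((0 : Int), (0 : Int)) = (pvH l, pvT l) := by
  induction l with
  | nil => simp [pvH, pvT]
  | cons s r ih =>
      rw [List.foldr_cons, ih]
      simp only [hashValueFinderAltStep, pvH, pvT, pvW, Prod.mk.injEq]
      split_ifs <;> constructor <;> ring

-- ===== VERDICT =====
theorem hashValueFinder_spec : Claim_equal_hashValueFinder := by
  intro state _
  unfold Spec_hashValueFinder hashValueFinder hashValueFinder_alt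
  rw [List.foldl_reverse, pvFoldr_eq, pvGo_eq]
  simp
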